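-- pv_equiv track=rewrite | github.com/andresculchac/EstructurasDeDatosUnal | semana3/deTin.py | tin
-- ===== SOURCE A (Python) =====
-- def tin(N,K):
--     students = [i for i in range(1,N+1)] #[1,2,3,4,5]
--     inicio = 0
--     while N != 1:
--         u = (inicio + K-1) % N
--         cleanP = students.pop(u)
--         inicio = u
--         N = len(students)
--         K = cleanP % N
--         if K == 0:
--             K = 1
--     return students[0]
-- ===== SOURCE B (Python) =====
-- def tin(N, K):
--     # Order-statistic tree over the values 1..N: each node caches how many
--     # survivors its subtree still holds; the u-th survivor is found and
--     # deleted by descending the cached counts.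
--     def build(lo, hi):
--         if lo == hi:
--             return (1, lo)                      # leaf: (count, value)
--         mid = (lo + hi) // 2
--         left = build(lo, mid)
--         right = build(mid + 1, hi)
--         return (left[0] + right[0], left, right)
--
--     def remove(t, k):                           # delete the k-th survivor
--         if len(t) == 2:
--             return t[1], (0, t[1])
--         _, left, right = t
--         if k < left[0]:
--             v, left = remove(left, k)
--         else:
--             v, right = remove(right, k - left[0])
--         return v, (left[0] + right[0], left, right)
--
--     tree = build(1, N)
--     inicio = 0
--     n = N
--     while n != 1:
--         u = (inicio + K - 1) % n
--         v, tree = remove(tree, u)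
--         inicio = u
--         n -= 1
--         K = v % n
--         if K == 0:
--             K = 1
--     v, _ = remove(tree, 0)
--     return v
-- ===== Notes on version B (the rewrite author's own statement) =====
-- stated objective: alternative
-- what changed: B replaces A's survivor list with its pop(u) and moving pointer by a count-augmented binary tree over the values 1..N, in which each round finds and deletes the u-th survivor by descending the cached subtree counts.
import Mathlib
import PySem

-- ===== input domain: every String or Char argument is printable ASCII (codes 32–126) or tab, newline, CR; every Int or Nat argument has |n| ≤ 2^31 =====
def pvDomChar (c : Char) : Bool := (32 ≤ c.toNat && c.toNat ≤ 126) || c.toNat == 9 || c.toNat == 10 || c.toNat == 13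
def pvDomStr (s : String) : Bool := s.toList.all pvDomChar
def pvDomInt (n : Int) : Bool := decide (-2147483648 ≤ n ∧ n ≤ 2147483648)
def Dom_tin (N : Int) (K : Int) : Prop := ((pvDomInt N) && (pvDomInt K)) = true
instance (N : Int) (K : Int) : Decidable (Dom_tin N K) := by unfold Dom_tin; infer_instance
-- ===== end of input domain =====

-- B replaces A's survivor list by a count-augmented binary tree over the values 1..N,
-- locating and deleting the u-th survivor by descending the cached subtree counts.

-- ===== PORT A =====
-- A's while loop, as fuel recursion over the state (students, inicio, N, K);
-- pop? = students.pop(u) (none exactly where Python raises IndexError).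
def tinLoopA : Nat → List Int → Int → Int → Int → Int
  | 0, students, _, _, _ => (PySem.List.pyGet? students 0).getD 0
  | fuel+1, students, inicio, n, k =>
    if n = 1 then (PySem.List.pyGet? students 0).getD 0
    else
      let u := PySem.Int.mod (inicio + k - 1) n
      match PySem.List.pop? students u with
      | none => 0   -- Python: IndexError (outside Pre_)
      | some (cleanP, rest) =>
        let n' : Int := rest.length
        let k' := PySem.Int.mod cleanP n'
        tinLoopA fuel rest u n' (if k' = 0 then 1 else k')

def tin (N : Int) (K : Int) : Int :=
  let students := PySem.List.pyRange 1 (N+1) 1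
  tinLoopA students.length students 0 N K

-- ===== PORT B =====
-- B's tree: Python's tuples (count, value) / (count, left, right)
inductive PTree where
  | leaf : Int → Int → PTree            -- (count, value)
  | node : Int → PTree → PTree → PTree  -- (count, left, right)
deriving Repr

-- t[0] in Python (the cached survivor count)
def cntT : PTree → Int
  | .leaf c _ => c
  | .node c _ _ => c

-- B's build(lo, hi); Python's recursion is unbounded (it diverges for lo > hi,
-- outside Pre_), so the port carries fuel; with enough fuel it is build itself.
def buildT : Nat → Int → Int → PTree
  | 0, _, hi => .leaf 1 hi   -- fuel exhausted: unreachable with the fuel tin_alt supplies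
  | fuel+1, lo, hi =>
    if lo = hi then .leaf 1 lo
    else
      let mid := PySem.Int.floordiv (lo + hi) 2
      let left := buildT fuel lo mid
      let right := buildT fuel (mid+1) hi
      .node (cntT left + cntT right) left right

-- B's remove(t, k): delete the k-th survivor, returning (its value, new tree)
def removeT : PTree → Int → Int × PTree
  | .leaf _ v, _ => (v, .leaf 0 v)
  | .node _ left right, k =>
    if k < cntT left then
      let p := removeT left k
      (p.1, .node (cntT p.2 + cntT right) p.2 right)
    else
      let p := removeT right (k - cntT left)
      (p.1, .node (cntT left + cntT p.2) left p.2)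

-- B's while loop over the state (tree, inicio, n, K)
def tinLoopB : Nat → PTree → Int → Int → Int → Int
  | 0, tree, _, _, _ => (removeT tree 0).1
  | fuel+1, tree, inicio, n, k =>
    if n ≠ 1 then
      let u := PySem.Int.mod (inicio + k - 1) n
      let p := removeT tree u
      let n' := n - 1
      let k' := PySem.Int.mod p.1 n'
      tinLoopB fuel p.2 u n' (if k' = 0 then 1 else k')
    else (removeT tree 0).1

def tin_alt (N : Int) (K : Int) : Int :=
  let tree := buildT (N.toNat + 1) 1 N
  tinLoopB N.toNat tree 0 N K

-- ===== PRECONDITION & SPEC =====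
-- Pre_ excludes exactly N < 1, where Python A raises (ZeroDivisionError for N = 0,
-- IndexError for N < 0); B raises there too (RecursionError in build).
def Pre_tin (N : Int) (K : Int) : Prop := 1 ≤ N
instance (N : Int) (K : Int) : Decidable (Pre_tin N K) := by unfold Pre_tin; infer_instance
def pvWitness_tin : Int × Int := (7, 3)
def Spec_tin (N : Int) (K : Int) (out : Int) : Prop := out = tin_alt N K
instance (N : Int) (K : Int) (out : Int) : Decidable (Spec_tin N K out) := by unfold Spec_tin; infer_instance

-- ===== CLAIM (what is proved, stated in full; the proofs are below) =====
def Claim_equal_tin : Prop := ∀ (N : Int) (K : Int), Dom_tin N K → Pre_tin N K → Spec_tin N K (tin N K)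

-- ===== LEMMAS AND PROOFS =====

-- the survivors a tree holds, in value order (the list A maintains explicitly)
def leavesT : PTree → List Int
  | .leaf c v => if c = 0 then [] else [v]
  | .node _ left right => leavesT left ++ leavesT right

-- well-formedness: every cached count is the true survivor count
def WFT : PTree → Prop
  | .leaf c _ => c = 0 ∨ c = 1
  | .node c left right => WFT left ∧ WFT right ∧ c = cntT left + cntT right

lemma cntT_eq : ∀ (t : PTree), WFT t → cntT t = ((leavesT t).length : Int)
  | .leaf c v, h => by
    rcases h with h | h <;> simp [cntT, leavesT, h]
  | .node c left right, ⟨hl, hr, hc⟩ => by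
    rw [show cntT (.node c left right) = c from rfl, hc,
        cntT_eq left hl, cntT_eq right hr]
    simp only [leavesT, List.length_append]
    push_cast
    ring

-- remove(t, k) returns exactly the k-th survivor and erases it
lemma removeT_spec : ∀ (t : PTree) (kk : Nat) (hw : WFT t)
    (hk : kk < (leavesT t).length),
    (removeT t (kk : Int)).1 = (leavesT t)[kk]'hk ∧
    leavesT (removeT t (kk : Int)).2 = (leavesT t).eraseIdx kk ∧
    WFT (removeT t (kk : Int)).2
  | .leaf c v, kk, hw, hk => by
    have hc : c ≠ 0 := by
      intro h; simp [leavesT, h] at hk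
    have hk0 : kk = 0 := by simp [leavesT, hc] at hk; omega
    subst hk0
    refine ⟨?_, ?_, ?_⟩ <;> simp [removeT, leavesT, WFT, hc]
  | .node c left right, kk, ⟨hl, hr, hc⟩, hk => by
    simp only [leavesT, List.length_append] at hk
    by_cases hcase : (kk : Int) < cntT left
    · have hkl : kk < (leavesT left).length := by
        rw [cntT_eq left hl] at hcase; exact_mod_cast hcase
      obtain ⟨h1, h2, h3⟩ := removeT_spec left kk hl hkl
      refine ⟨?_, ?_, ?_⟩
      · simp only [removeT, if_pos hcase, leavesT]
        rw [List.getElem_append_left hkl]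
        exact h1
      · simp only [removeT, if_pos hcase, leavesT]
        rw [h2, List.eraseIdx_append_of_lt_length hkl]
      · simp only [removeT, if_pos hcase]
        exact ⟨h3, hr, rfl⟩
    · have hge : (leavesT left).length ≤ kk := by
        rw [cntT_eq left hl] at hcase; omega
      have hcast : (kk : Int) - cntT left = ((kk - (leavesT left).length : Nat) : Int) := by
        rw [cntT_eq left hl]; omega
      have hkr : kk - (leavesT left).length < (leavesT right).length := by omega
      obtain ⟨h1, h2, h3⟩ := removeT_spec right (kk - (leavesT left).length) hr hkr
      rw [← hcast] at h1 h2 h3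
      refine ⟨?_, ?_, ?_⟩
      · simp only [removeT, if_neg hcase, leavesT]
        rw [List.getElem_append_right hge]
        exact h1
      · simp only [removeT, if_neg hcase, leavesT]
        rw [h2, List.eraseIdx_append_of_length_le hge]
      · simp only [removeT, if_neg hcase]
        exact ⟨hl, h3, rfl⟩

-- build(lo, hi) with enough fuel holds exactly the values lo..hi, all alive
lemma buildT_spec : ∀ (fuel : Nat) (lo hi : Int), lo ≤ hi → (hi - lo).toNat < fuel →
    leavesT (buildT fuel lo hi) = PySem.List.pyRange lo (hi+1) 1 ∧
    WFT (buildT fuel lo hi) := by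
  intro fuel
  induction fuel with
  | zero => intro lo hi _ hf; omega
  | succ fuel ih =>
    intro lo hi hle hf
    by_cases heq : lo = hi
    · subst heq
      simp [buildT, leavesT, WFT, PySem.List.pyRange_one_singleton]
    · have hlt : lo < hi := lt_of_le_of_ne hle heq
      obtain ⟨hm1, hm2⟩ := PySem.Int.floordiv_two_mid_bounds hle
      have hm3 : PySem.Int.floordiv (lo + hi) 2 < hi := by
        rw [PySem.Int.floordiv_lt_iff_lt_mul (by omega : (0:Int) < 2)]; omega
      obtain ⟨ihl1, ihl2⟩ := ih lo (PySem.Int.floordiv (lo + hi) 2) hm1 (by omega)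
      obtain ⟨ihr1, ihr2⟩ := ih (PySem.Int.floordiv (lo + hi) 2 + 1) hi (by omega) (by omega)
      simp only [buildT, if_neg heq]
      refine ⟨?_, ihl2, ihr2, rfl⟩
      simp only [leavesT, ihl1, ihr1]
      rw [← PySem.List.pyRange_one_append lo (PySem.Int.floordiv (lo + hi) 2 + 1) (hi+1)
            (by omega) (by omega)]

-- the main loop correspondence: the tree stands for A's list of survivors
lemma loops_eq : ∀ (fuel : Nat) (s : List Int) (t : PTree) (inicio K : Int),
    WFT t → leavesT t = s → s.length ≤ fuel + 1 → 1 ≤ s.length →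
    tinLoopA fuel s inicio (s.length : Int) K = tinLoopB fuel t inicio (s.length : Int) K := by
  intro fuel
  induction fuel with
  | zero =>
    intro s t inicio K hw hleaves hfuel hlen
    have h1 : s.length = 1 := by omega
    obtain ⟨x, rfl⟩ := List.length_eq_one_iff.mp h1
    obtain ⟨h1', _, _⟩ := removeT_spec t 0 hw (by rw [hleaves]; omega)
    simp only [tinLoopA, tinLoopB]
    rw [show ((0:Nat):Int) = (0:Int) from rfl] at h1'
    rw [h1']
    simp [hleaves]
  | succ fuel ih =>
    intro s t inicio K hw hleaves hfuel hlen
    by_cases h1 : s.length = 1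
    · -- loop exits: A reads students[0], B deletes the 0-th (only) survivor
      obtain ⟨x, rfl⟩ := List.length_eq_one_iff.mp h1
      obtain ⟨h1', _, _⟩ := removeT_spec t 0 hw (by rw [hleaves]; omega)
      simp only [tinLoopA, tinLoopB]
      rw [if_pos (by exact_mod_cast h1), if_neg (by simp)]
      rw [show ((0:Nat):Int) = (0:Int) from rfl] at h1'
      rw [h1']
      simp [hleaves]
    · -- n ≥ 2: one iteration on each side, same u, same removed value
      have hn2 : 2 ≤ s.length := by omega
      have hnpos : (0:Int) < (s.length : Int) := by exact_mod_cast (by omega : 0 < s.length)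
      simp only [tinLoopA, tinLoopB]
      rw [if_neg (by exact_mod_cast fun h => h1 (by exact_mod_cast h)),
          if_pos (by exact_mod_cast fun h => h1 (by exact_mod_cast h))]
      rw [PySem.Int.mod_eq_emod_of_pos hnpos]
      obtain ⟨m, hm⟩ : ∃ m : Nat, (inicio + K - 1) % (s.length:Int) = (m:Int) :=
        ⟨((inicio + K - 1) % (s.length:Int)).toNat, by
          have := Int.emod_nonneg (inicio + K - 1) (by omega : (s.length:Int) ≠ 0)
          omega⟩
      have hmn : m < s.length := by
        have := Int.emod_lt_of_pos (inicio + K - 1) hnpos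
        rw [hm] at this; exact_mod_cast this
      rw [hm]
      obtain ⟨hv, hl, hw'⟩ := removeT_spec t m hw (by rw [hleaves]; exact hmn)
      rw [PySem.List.pop?_natCast s m hmn]
      simp only [hv, hleaves]
      have herlen : (s.eraseIdx m).length = s.length - 1 := by
        rw [List.length_eraseIdx]; simp [hmn]
      have hcast : ((s.eraseIdx m).length : Int) = (s.length : Int) - 1 := by
        rw [herlen]; push_cast [Nat.cast_sub (by omega : 1 ≤ s.length)]; ring
      rw [show ((s.length:Int) - 1) = ((s.eraseIdx m).length : Int) from hcast.symm]
      exact ih (s.eraseIdx m) (removeT t (m:Int)).2 (m:Int) _ hw'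
        (by rw [hl, hleaves]) (by omega) (by omega)

-- ===== VERDICT (by name: the statement is the Claim_ definition above) =====
theorem tin_spec : Claim_equal_tin := by
  intro N K _hdom hpre
  have hN : 1 ≤ N := hpre
  unfold Spec_tin tin tin_alt
  have hlen : (PySem.List.pyRange 1 (N+1) 1).length = N.toNat := by
    rw [PySem.List.length_pyRange_one]; congr 1; omega
  obtain ⟨hb1, hb2⟩ := buildT_spec (N.toNat + 1) 1 N hN (by omega)
  have h1 : 1 ≤ (PySem.List.pyRange 1 (N+1) 1).length := by rw [hlen]; omega
  have := loops_eq N.toNat (PySem.List.pyRange 1 (N+1) 1) (buildT (N.toNat + 1) 1 N)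
    0 K hb2 hb1 (by omega) h1
  rw [hlen, show ((N.toNat : Int)) = N from by omega] at this
  simpa [hlen] using this
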